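-- pv_equiv track=rewrite | github.com/francisco-campos-b/codewars | katas/kata_sentence_calculator.py | letters_to_numbers
-- ===== SOURCE A (Python) =====
-- def letters_to_numbers(s):
--     """Returns the score or the given string based on a specific set of rules"""
--     score = 0
--     letter_dict = {
--         "a": 1,
--         "b": 2,
--         "c": 3,
--         "d": 4,
--         "e": 5,
--         "f": 6,
--         "g": 7,
--         "h": 8,
--         "i": 9,
--         "j": 10,
--         "k": 11,
--         "l": 12,
--         "m": 13,
--         "n": 14,
--         "o": 15,
--         "p": 16,
--         "q": 17,
--         "r": 18,
--         "s": 19,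
--         "t": 20,
--         "u": 21,
--         "v": 22,
--         "w": 23,
--         "x": 24,
--         "y": 25,
--         "z": 26,
--         "1": 1,
--         "2": 2,
--         "3": 3,
--         "4": 4,
--         "5": 5,
--         "6": 6,
--         "7": 7,
--         "8": 8,
--         "9": 9,
--     }
--
--     for character in s:
--         for key in letter_dict:
--             if character == key:
--                 score += letter_dict[character]
--             elif character == key.upper():
--                 score += letter_dict[key] * 2
--     return score
-- ===== SOURCE B (Python) =====
-- def letters_to_numbers(s):
--     """Returns the score or the given string based on a specific set of rules"""
--     score = 0
--     for c in s:
--         o = ord(c)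
--         if 97 <= o <= 122:
--             score += o - 96
--         elif 65 <= o <= 90:
--             score += (o - 64) * 2
--         elif 49 <= o <= 57:
--             score += o - 48
--     return score
-- ===== Notes on version B (the rewrite author's own statement) =====
-- stated objective: faster
-- what changed: Replaces the 35-key dictionary and the inner scan over all keys per character with a single pass using closed-form arithmetic on code points (ord ranges for lowercase, uppercase, digits 1-9).
import Mathlib
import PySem

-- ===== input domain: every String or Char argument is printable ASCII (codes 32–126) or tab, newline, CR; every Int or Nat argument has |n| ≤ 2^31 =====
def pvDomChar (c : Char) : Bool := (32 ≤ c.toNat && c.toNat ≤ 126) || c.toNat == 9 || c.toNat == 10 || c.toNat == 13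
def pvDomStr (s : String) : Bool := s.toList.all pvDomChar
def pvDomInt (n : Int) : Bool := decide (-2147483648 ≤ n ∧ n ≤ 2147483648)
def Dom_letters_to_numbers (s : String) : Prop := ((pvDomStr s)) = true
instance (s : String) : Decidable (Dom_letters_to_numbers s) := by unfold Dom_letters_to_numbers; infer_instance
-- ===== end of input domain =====

-- B drops A's 35-key dictionary and its per-character scan over every key, scoring each
-- character in one step by closed-form arithmetic on its code point (constant-factor speedup).

-- ===== PORT A =====
-- A's letter_dict, as an insertion-ordered association list (keys are the
-- 1-character Python strings, ported as Char)
def letterDictA : PySem.Dict Char Int := PySem.Dict.mk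
  [('a', 1), ('b', 2), ('c', 3), ('d', 4), ('e', 5), ('f', 6), ('g', 7), ('h', 8), ('i', 9),
   ('j', 10), ('k', 11), ('l', 12), ('m', 13), ('n', 14), ('o', 15), ('p', 16), ('q', 17),
   ('r', 18), ('s', 19), ('t', 20), ('u', 21), ('v', 22), ('w', 23), ('x', 24), ('y', 25),
   ('z', 26), ('1', 1), ('2', 2), ('3', 3), ('4', 4), ('5', 5), ('6', 6), ('7', 7), ('8', 8),
   ('9', 9)]

-- for character in s: for key in letter_dict: if character == key: score += letter_dict[character]
--                                             elif character == key.upper(): score += letter_dict[key] * 2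
-- (key.upper() on a 1-char ASCII key is Char.toUpper, exact here; letter_dict[character]
--  is taken inside the branch character == key, so it never raises — getD with default 0 is exact)
def letters_to_numbers (s : String) : Int :=
  s.toList.foldl (fun score character =>
    letterDictA.keys.foldl (fun sc key =>
      if character = key then sc + letterDictA.getD character 0
      else if character = key.toUpper then sc + letterDictA.getD key 0 * 2
      else sc) score) 0

-- ===== PORT B =====
def letters_to_numbers_alt (s : String) : Int :=
  s.toList.foldl (fun score c =>
    let o : Int := (c.toNat : Int)
    if 97 ≤ o ∧ o ≤ 122 then score + (o - 96)
    else if 65 ≤ o ∧ o ≤ 90 then score + (o - 64) * 2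
    else if 49 ≤ o ∧ o ≤ 57 then score + (o - 48)
    else score) 0

-- ===== PRECONDITION & SPEC =====
def Spec_letters_to_numbers (s : String) (out : Int) : Prop := out = letters_to_numbers_alt s
instance (s : String) (out : Int) : Decidable (Spec_letters_to_numbers s out) := by unfold Spec_letters_to_numbers; infer_instance

-- ===== CLAIM (what is proved, stated in full; the proofs are below) =====
def Claim_equal_letters_to_numbers : Prop := ∀ (s : String), Dom_letters_to_numbers s → Spec_letters_to_numbers s (letters_to_numbers s)

-- ===== LEMMAS AND PROOFS =====

-- B's per-character increment, as a function
def charScoreB (c : Char) : Int :=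
  let o : Int := (c.toNat : Int)
  if 97 ≤ o ∧ o ≤ 122 then o - 96
  else if 65 ≤ o ∧ o ≤ 90 then (o - 64) * 2
  else if 49 ≤ o ∧ o ≤ 57 then o - 48
  else 0

-- A's inner loop over the 35 keys, as a function of the character and accumulator
def innerA (c : Char) (acc : Int) : Int :=
  letterDictA.keys.foldl (fun sc key =>
      if c = key then sc + letterDictA.getD c 0
      else if c = key.toUpper then sc + letterDictA.getD key 0 * 2
      else sc) acc

-- a fold whose step shifts additively can be started at 0
theorem foldl_step_shift {α : Type} (f : Int → α → Int)
    (hf : ∀ a b k, f (a + b) k = a + f b k) :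
    ∀ (l : List α) (a b : Int), l.foldl f (a + b) = a + l.foldl f b := by
  intro l
  induction l with
  | nil => intro a b; rfl
  | cons c t ih => intro a b; simp only [List.foldl, hf]; exact ih a (f b c)

theorem innerA_zero_add (c : Char) (acc : Int) : innerA c acc = acc + innerA c 0 := by
  have h := foldl_step_shift
      (fun sc key =>
        if c = key then sc + letterDictA.getD c 0
        else if c = key.toUpper then sc + letterDictA.getD key 0 * 2
        else sc)
      (by intro a b k; dsimp only; split_ifs <;> ring)
      letterDictA.keys acc 0
  simpa [innerA] using h

-- on every Dom character, A's inner loop starting at 0 yields B's per-character score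
theorem innerA_eq (c : Char) (hc : pvDomChar c = true) : innerA c 0 = charScoreB c := by
  have hofn : Char.ofNat c.toNat = c := Char.ofNat_toNat c
  have hb : (32 ≤ c.toNat ∧ c.toNat ≤ 126) ∨ c.toNat = 9 ∨ c.toNat = 10 ∨ c.toNat = 13 := by
    simp only [pvDomChar, Bool.or_eq_true, Bool.and_eq_true, decide_eq_true_iff, beq_iff_eq] at hc
    tauto
  set n := c.toNat with hn
  rw [← hofn]
  rcases hb with ⟨h1, h2⟩ | h | h | h
  · interval_cases n <;> decide
  all_goals (rw [h]; decide)

theorem fold_eq (l : List Char) (hl : ∀ c ∈ l, pvDomChar c = true) (acc : Int) :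
    l.foldl (fun score character =>
      letterDictA.keys.foldl (fun sc key =>
        if character = key then sc + letterDictA.getD character 0
        else if character = key.toUpper then sc + letterDictA.getD key 0 * 2
        else sc) score) acc
    = l.foldl (fun score c =>
        let o : Int := (c.toNat : Int)
        if 97 ≤ o ∧ o ≤ 122 then score + (o - 96)
        else if 65 ≤ o ∧ o ≤ 90 then score + (o - 64) * 2
        else if 49 ≤ o ∧ o ≤ 57 then score + (o - 48)
        else score) acc := by
  induction l generalizing acc with
  | nil => rfl
  | cons c t ih =>
    have hc : pvDomChar c = true := hl c (List.mem_cons_self ..)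
    have hstepA : letterDictA.keys.foldl (fun sc key =>
        if c = key then sc + letterDictA.getD c 0
        else if c = key.toUpper then sc + letterDictA.getD key 0 * 2
        else sc) acc = acc + charScoreB c := by
      rw [show letterDictA.keys.foldl _ acc = innerA c acc from rfl, innerA_zero_add,
        innerA_eq c hc]
    have hstepB : (let o : Int := (c.toNat : Int)
        if 97 ≤ o ∧ o ≤ 122 then acc + (o - 96)
        else if 65 ≤ o ∧ o ≤ 90 then acc + (o - 64) * 2
        else if 49 ≤ o ∧ o ≤ 57 then acc + (o - 48)
        else acc) = acc + charScoreB c := by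
      simp only [charScoreB]; split_ifs <;> ring
    simp only [List.foldl, hstepA, hstepB]
    exact ih (fun c hc => hl c (List.mem_cons_of_mem _ hc)) _

-- ===== VERDICT (by name: the statement is the Claim_ definition above) =====
theorem letters_to_numbers_spec : Claim_equal_letters_to_numbers := by
  intro s hs
  have hl : ∀ c ∈ s.toList, pvDomChar c = true := by
    intro c hc
    exact List.all_eq_true.mp hs c hc
  unfold Spec_letters_to_numbers letters_to_numbers letters_to_numbers_alt
  exact fold_eq s.toList hl 0
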